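-- pv_equiv track=rewrite | github.com/Jacksadventure/betaMax | match_partial.py | _partial_isbn
-- ===== SOURCE A (Python) =====
-- def _partial_isbn(text: str) -> bool:
--     digits = 0
--     last_sep = False
--     for ch in text:
--         if ch.isdigit():
--             digits += 1
--             if digits > 10:
--                 return False
--             last_sep = False
--         elif ch in "- ":
--             if digits == 0 or last_sep:
--                 return False
--             last_sep = True
--         elif ch.upper() == "X":
--             if digits != 9:
--                 return False
--             digits += 1
--             last_sep = False
--         else:
--             return False
--     return digits < 10
-- ===== SOURCE B (Python) =====
-- def _partial_isbn(text: str) -> bool: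
--     # Declarative re-implementation: a string is a valid partial ISBN-10 iff
--     # every char is a digit or separator, it does not start with a separator,
--     # no two separators are adjacent, and it holds fewer than 10 digits.
--     # ('X'/'x' never appears in a string A accepts: the X branch can only lead
--     # to digits == 10, which the final strict '< 10' check always rejects.)
--     seps = "- "
--     return (all(c.isdigit() or c in seps for c in text)
--             and (not text or text[0] not in seps)
--             and all(not (a in seps and b in seps) for a, b in zip(text, text[1:]))
--             and sum(c.isdigit() for c in text) < 10)
-- ===== Notes on version B (the rewrite author's own statement) =====
-- stated objective: simpler
-- what changed: Replaces the sequential state machine (digit counter + last_sep flag with early returns) by a stateless conjunction of four local conditions: all chars are digits/separators, no leading separator, no adjacent separators (checked on zip(text, text[1:])), and fewer than 10 digits; the X branch disappears because any X inevitably leads A to False.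
import Mathlib
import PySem

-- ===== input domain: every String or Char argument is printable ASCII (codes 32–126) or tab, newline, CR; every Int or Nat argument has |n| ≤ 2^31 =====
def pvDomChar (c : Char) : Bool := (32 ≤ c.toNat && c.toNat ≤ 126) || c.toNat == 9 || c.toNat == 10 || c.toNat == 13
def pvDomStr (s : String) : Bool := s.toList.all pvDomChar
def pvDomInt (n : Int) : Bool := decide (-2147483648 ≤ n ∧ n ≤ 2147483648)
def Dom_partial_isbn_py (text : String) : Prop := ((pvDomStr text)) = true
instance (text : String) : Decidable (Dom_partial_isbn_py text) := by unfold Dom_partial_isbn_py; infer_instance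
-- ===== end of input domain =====

-- B replaces A's sequential state machine by a stateless conjunction of four local
-- conditions on the string (objective: simpler); same O(n) cost.

-- ===== PORT A =====
-- A's for-loop with early returns, as structural recursion over the chars with
-- the loop state (digits, last_sep); early 'return False' = the literal 'false'.
def pvALoop : List Char → Int → Bool → Bool
  | [], digits, _ => decide (digits < 10)
  | ch :: rest, digits, lastSep =>
    if PySem.Chars.isdigit ch then
      -- digits += 1; if digits > 10: return False; last_sep = False
      if digits + 1 > 10 then false else pvALoop rest (digits + 1) false
    else if ch = '-' || ch = ' ' then      -- ch in "- " (single char: membership = equality with one of the two chars)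
      if digits == 0 || lastSep then false else pvALoop rest digits true
    else if PySem.Chars.upperChar ch = 'X' then   -- ch.upper() == "X"
      if digits ≠ 9 then false else pvALoop rest (digits + 1) false
    else false

def partial_isbn_py (text : String) : Bool := pvALoop text.toList 0 false

-- ===== PORT B =====
def pvIsSep (c : Char) : Bool := c = '-' || c = ' '    -- c in "- "

def partial_isbn_py_alt (text : String) : Bool :=
  let cs := text.toList
  (cs.all fun c => PySem.Chars.isdigit c || pvIsSep c) &&
  (cs.isEmpty || !pvIsSep (cs.headD ' ')) &&
  ((cs.zip cs.tail).all fun p => !(pvIsSep p.1 && pvIsSep p.2)) &&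
  decide ((cs.map fun c => if PySem.Chars.isdigit c then (1 : Int) else 0).sum < 10)

-- ===== PRECONDITION & SPEC =====
def Spec_partial_isbn_py (text : String) (out : Bool) : Prop := out = partial_isbn_py_alt text
instance (text : String) (out : Bool) : Decidable (Spec_partial_isbn_py text out) := by unfold Spec_partial_isbn_py; infer_instance

-- ===== CLAIM (what is proved, stated in full; the proofs are below) =====
def Claim_equal_partial_isbn_py : Prop := ∀ (text : String), Dom_partial_isbn_py text → Spec_partial_isbn_py text (partial_isbn_py text)

-- ===== LEMMAS AND PROOFS =====

def pvScore (cs : List Char) : Int := (cs.map fun c => if PySem.Chars.isdigit c then (1 : Int) else 0).sum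

def pvAll (cs : List Char) : Bool := cs.all fun c => PySem.Chars.isdigit c || pvIsSep c

def pvZipAll (cs : List Char) : Bool := (cs.zip cs.tail).all fun p => !(pvIsSep p.1 && pvIsSep p.2)

def pvPairOk (c : Char) (cs : List Char) : Bool :=
  match cs with
  | [] => true
  | c' :: _ => !(pvIsSep c && pvIsSep c')

-- the head-of-string condition relative to the incoming state (d, ls)
def pvHeadOk (cs : List Char) (d : Int) (ls : Bool) : Bool :=
  match cs with
  | [] => true
  | c :: _ => !pvIsSep c || (decide (d ≠ 0) && !ls)

lemma pvScore_nonneg (cs : List Char) : 0 ≤ pvScore cs := by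
  induction cs with
  | nil => simp [pvScore]
  | cons c cs ih =>
    simp only [pvScore, List.map_cons, List.sum_cons] at *
    split_ifs <;> omega

lemma pvScore_cons (c : Char) (cs : List Char) :
    pvScore (c :: cs) = (if PySem.Chars.isdigit c then (1 : Int) else 0) + pvScore cs := by
  simp [pvScore]

lemma pvAll_cons (c : Char) (cs : List Char) :
    pvAll (c :: cs) = ((PySem.Chars.isdigit c || pvIsSep c) && pvAll cs) := by
  simp [pvAll]

lemma pvIsSep_not_digit {c : Char} (h : pvIsSep c = true) : PySem.Chars.isdigit c = false := by
  simp [pvIsSep] at h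
  rcases h with h | h <;> subst h <;> decide

lemma pvZipAll_cons (c : Char) (cs : List Char) :
    pvZipAll (c :: cs) = (pvPairOk c cs && pvZipAll cs) := by
  cases cs <;> simp [pvZipAll, pvPairOk]

lemma pvKey (cs : List Char) : ∀ (d : Int) (ls : Bool), 0 ≤ d → d ≤ 10 →
    pvALoop cs d ls = (pvAll cs && pvHeadOk cs d ls && pvZipAll cs && decide (d + pvScore cs < 10)) := by
  induction cs with
  | nil => intro d ls _ _; simp [pvALoop, pvAll, pvHeadOk, pvZipAll, pvScore]
  | cons c cs ih =>
    intro d ls h0 h10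
    have hsc := pvScore_nonneg cs
    rw [pvZipAll_cons, pvScore_cons, pvAll_cons]
    by_cases hd : PySem.Chars.isdigit c = true
    · have hs : pvIsSep c = false := by
        by_cases h : pvIsSep c = true
        · exact absurd hd (by simp [pvIsSep_not_digit h])
        · simpa using h
      by_cases hbig : d + 1 > 10
      · have hA : pvALoop (c :: cs) d ls = false := by simp [pvALoop, hd, hbig]
        have hc : decide (d + ((if PySem.Chars.isdigit c then (1:Int) else 0) + pvScore cs) < 10) = false := by
          simp [hd]; omega
        simp [hA, hc]
      · have hA : pvALoop (c :: cs) d ls = pvALoop cs (d + 1) false := by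
          simp [pvALoop, hd, hbig]
        rw [hA, ih (d + 1) false (by omega) (by omega)]
        have hho : pvHeadOk cs (d + 1) false = true := by
          cases cs with
          | nil => rfl
          | cons c' cs' => simp [pvHeadOk]; omega
        have hho' : pvHeadOk (c :: cs) d ls = true := by simp [pvHeadOk, hs]
        have hpair : pvPairOk c cs = true := by
          cases cs <;> simp [pvPairOk, hs]
        have hdec : decide (d + 1 + pvScore cs < 10)
            = decide (d + ((if PySem.Chars.isdigit c then (1:Int) else 0) + pvScore cs) < 10) := by
          simp only [hd, if_true]
          rw [add_assoc]
        rw [hho, hho', hpair, hdec, hd]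
        simp
    · by_cases hsp : pvIsSep c = true
      · have hsp' : (c = '-' || c = ' ') = true := by simpa [pvIsSep] using hsp
        have hgood : (PySem.Chars.isdigit c || pvIsSep c) = true := by simp [hsp]
        have hscc : (if PySem.Chars.isdigit c then (1:Int) else 0) = 0 := by simp [hd]
        rw [hgood, hscc, zero_add]
        by_cases hfail : (d == 0 || ls) = true
        · have hA : pvALoop (c :: cs) d ls = false := by
            simp [pvALoop, hd, hsp', hfail]
          have hho : pvHeadOk (c :: cs) d ls = false := by
            simp only [pvHeadOk, hsp, Bool.not_true, Bool.false_or]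
            rcases Bool.or_eq_true _ _ |>.mp hfail with h | h
            · have : d = 0 := by simpa [beq_iff_eq] using h
              simp [this]
            · simp [h]
          simp [hA, hho]
        · have hd0 : ¬ d = 0 := by
            intro h; subst h; simp at hfail
          have hls : ls = false := by
            cases ls
            · rfl
            · exact absurd (by simp) hfail
          have hA : pvALoop (c :: cs) d ls = pvALoop cs d true := by
            simp [pvALoop, hd, hsp', hfail]
          rw [hA, ih d true h0 h10]
          have hho' : pvHeadOk (c :: cs) d ls = true := by
            simp [pvHeadOk, hsp, hd0, hls]
          have hho : pvHeadOk cs d true = pvPairOk c cs := by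
            cases cs with
            | nil => rfl
            | cons c' cs' => simp [pvHeadOk, pvPairOk, hsp]
          rw [hho', hho]
          rw [Bool.eq_iff_iff]
          simp only [Bool.and_eq_true]
          tauto
      · -- not a digit, not a separator: pvAll fails; A may enter the X branch but always ends false
        have hgood : (PySem.Chars.isdigit c || pvIsSep c) = false := by
          simp [hd]
          simpa using hsp
        rw [hgood]
        simp only [Bool.false_and]
        by_cases hx : PySem.Chars.upperChar c = 'X'
        · by_cases h9 : d = 9
          · subst h9
            have hA : pvALoop (c :: cs) 9 ls = pvALoop cs 10 false := by
              simp [pvALoop, hd, hx]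
              intro h; exact absurd h (by simpa [pvIsSep] using hsp)
            rw [hA, ih 10 false (by omega) (by omega)]
            have h10' : decide ((10 : Int) + pvScore cs < 10) = false := by simp; omega
            rw [h10', Bool.and_false]
          · simp [pvALoop, hd, hx, h9]
            intro h; exact absurd h (by simpa [pvIsSep] using hsp)
        · simp [pvALoop, hd, hx]
          intro h; exact absurd h (by simpa [pvIsSep] using hsp)

-- ===== VERDICT (by name: the statement is the Claim_ definition above) =====
theorem partial_isbn_py_spec : Claim_equal_partial_isbn_py := by
  intro text _
  unfold Spec_partial_isbn_py partial_isbn_py partial_isbn_py_alt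
  rw [pvKey text.toList 0 false (by omega) (by omega)]
  cases h : text.toList with
  | nil => rfl
  | cons c cs =>
    have h1 : pvHeadOk (c :: cs) 0 false = !pvIsSep (List.headD (c :: cs) ' ') := by
      simp [pvHeadOk]
    rw [h1, zero_add]
    rfl
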